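-- pv_equiv track=rewrite | github.com/a554b554/EAML | skills/execute/scripts/hash.py | strip_hash_and_output
-- ===== SOURCE A (Python) =====
-- def strip_hash_and_output(text):
--     """Remove # Hash and # Output sections from extraction content."""
--     lines = text.split('\n')
--     result = []
--     skip = False
--     for line in lines:
--         if line.startswith('# Hash'):
--             skip = True
--             continue
--         elif line.startswith('# Output'):
--             skip = True
--             continue
--         elif skip and line.startswith('# '):
--             skip = False
--         if not skip:
--             result.append(line)
--     return '\n'.join(result)
-- ===== SOURCE B (Python) =====
-- def _dropped(sec):
--     return bool(sec) and (sec[0].startswith('# Hash') or sec[0].startswith('# Output'))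
--
--
-- def strip_hash_and_output(text):
--     """Remove # Hash and # Output sections from extraction content."""
--     sections = []
--     current = []
--     for line in text.split('\n'):
--         if line.startswith('# '):
--             sections.append(current)
--             current = [line]
--         else:
--             current = current + [line]
--     sections.append(current)
--     kept = [sec for sec in sections if not _dropped(sec)]
--     return '\n'.join([line for sec in kept for line in sec])
-- ===== Notes on version B (the rewrite author's own statement) =====
-- stated objective: alternative
-- what changed: Replaced A's single skip-flag scan by a group-then-filter pipeline: lines are first partitioned into header-delimited sections (with a headerless preamble), sections whose header starts with '# Hash' or '# Output' are filtered out, and the survivors are flattened and joined.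
import Mathlib
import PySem

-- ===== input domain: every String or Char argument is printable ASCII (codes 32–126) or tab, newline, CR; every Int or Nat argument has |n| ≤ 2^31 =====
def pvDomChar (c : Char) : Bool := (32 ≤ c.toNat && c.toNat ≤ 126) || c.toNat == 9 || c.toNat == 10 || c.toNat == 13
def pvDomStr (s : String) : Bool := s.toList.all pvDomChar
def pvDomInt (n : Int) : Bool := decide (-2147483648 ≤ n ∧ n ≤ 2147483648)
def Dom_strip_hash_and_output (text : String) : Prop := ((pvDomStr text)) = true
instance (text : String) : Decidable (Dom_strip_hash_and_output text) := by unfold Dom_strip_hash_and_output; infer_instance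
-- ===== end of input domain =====

-- B replaces A's skip-flag scan by group-into-sections, filter bad headers, flatten (alternative decomposition, same cost).

-- ===== PORT A =====
-- one loop step of A: state = (result, skip)
def pvStepA (st : List (List Char) × Bool) (line : List Char) : List (List Char) × Bool :=
  if PySem.Chars.startswith line "# Hash".toList then (st.1, true)
  else if PySem.Chars.startswith line "# Output".toList then (st.1, true)
  else
    let skip := if st.2 && PySem.Chars.startswith line "# ".toList then false else st.2
    if !skip then (st.1 ++ [line], skip) else (st.1, skip)

def strip_hash_and_output (text : String) : String :=
  let lines := PySem.Chars.splitOn text.toList "\n".toList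
  String.ofList (PySem.Chars.join "\n".toList (lines.foldl pvStepA ([], false)).1)

-- ===== PORT B =====
-- _dropped: section whose first line starts with '# Hash' or '# Output'
def pvDropped (sec : List (List Char)) : Bool :=
  match sec with
  | [] => false
  | h :: _ => PySem.Chars.startswith h "# Hash".toList || PySem.Chars.startswith h "# Output".toList

-- B's grouping loop: 'current' accumulator, a '# ' header closes the current section
def pvSections (cur : List (List Char)) : List (List Char) → List (List (List Char))
  | [] => [cur]
  | l :: rest =>
      if PySem.Chars.startswith l "# ".toList then cur :: pvSections [l] rest
      else pvSections (cur ++ [l]) rest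

def strip_hash_and_output_alt (text : String) : String :=
  let lines := PySem.Chars.splitOn text.toList "\n".toList
  let sections := pvSections [] lines
  let kept := sections.filter (fun sec => !pvDropped sec)
  String.ofList (PySem.Chars.join "\n".toList kept.flatten)

-- ===== PRECONDITION & SPEC =====
def Spec_strip_hash_and_output (text : String) (out : String) : Prop := out = strip_hash_and_output_alt text
instance (text : String) (out : String) : Decidable (Spec_strip_hash_and_output text out) := by unfold Spec_strip_hash_and_output; infer_instance

-- ===== CLAIM (what is proved, stated in full; the proofs are below) =====
def Claim_equal_strip_hash_and_output : Prop := ∀ (text : String), Dom_strip_hash_and_output text → Spec_strip_hash_and_output text (strip_hash_and_output text)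

-- ===== LEMMAS AND PROOFS =====

-- tail-recursive characterisation of A's loop output from a given skip flag
def pvProcA : Bool → List (List Char) → List (List Char)
  | _, [] => []
  | skip, l :: r =>
    if PySem.Chars.startswith l "# Hash".toList || PySem.Chars.startswith l "# Output".toList then
      pvProcA true r
    else
      let skip' := skip && !PySem.Chars.startswith l "# ".toList
      (if skip' then [] else [l]) ++ pvProcA skip' r

theorem pvFoldA (lines : List (List Char)) :
    ∀ (res : List (List Char)) (skip : Bool),
      (lines.foldl pvStepA (res, skip)).1 = res ++ pvProcA skip lines := by
  induction lines with
  | nil => intro res skip; simp [pvProcA]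
  | cons l r ih =>
      intro res skip
      rw [List.foldl_cons]
      by_cases h1 : PySem.Chars.startswith l ['#', ' ', 'H', 'a', 's', 'h'] = true
      · simp [pvStepA, pvProcA, h1, ih]
      · by_cases h2 : PySem.Chars.startswith l ['#', ' ', 'O', 'u', 't', 'p', 'u', 't'] = true
        · simp [pvStepA, pvProcA, h1, h2, ih]
        · by_cases h3 : PySem.Chars.startswith l ['#', ' '] = true <;>
            cases skip <;> simp [pvStepA, pvProcA, h1, h2, h3, ih]

theorem pvSwTrans (l : List Char) (h : PySem.Chars.startswith l ['#', ' '] = false) :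
    PySem.Chars.startswith l ['#', ' ', 'H', 'a', 's', 'h'] = false ∧
    PySem.Chars.startswith l ['#', ' ', 'O', 'u', 't', 'p', 'u', 't'] = false := by
  constructor <;> {
    by_contra hc
    simp only [Bool.not_eq_false] at hc
    rw [PySem.Chars.startswith_iff] at hc
    have h2 : PySem.Chars.startswith l ['#', ' '] = true := by
      rw [PySem.Chars.startswith_iff]
      exact List.IsPrefix.trans (by decide) hc
    simp [h2] at h }

theorem pvMain (lines : List (List Char)) :
    ∀ (cur : List (List Char)),
      (pvDropped cur = false →
        ((pvSections cur lines).filter (fun sec => !pvDropped sec)).flatten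
          = cur ++ pvProcA false lines) ∧
      (pvDropped cur = true →
        ((pvSections cur lines).filter (fun sec => !pvDropped sec)).flatten
          = pvProcA true lines) := by
  induction lines with
  | nil =>
      intro cur
      constructor <;> intro h <;> simp [pvSections, pvProcA, h]
  | cons l r ih =>
      intro cur
      by_cases h3 : PySem.Chars.startswith l ['#', ' '] = true
      · -- header line: close the current section, open a new one at l
        by_cases hb : (PySem.Chars.startswith l ['#', ' ', 'H', 'a', 's', 'h'] ||
                       PySem.Chars.startswith l ['#', ' ', 'O', 'u', 't', 'p', 'u', 't']) = true
        · have hF := (ih [l]).2 (by simpa [pvDropped] using hb)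
          rcases Bool.or_eq_true_iff.mp hb with h1 | h1 <;>
            constructor <;> intro h <;>
              simp [pvSections, pvProcA, h3, h1, h, hF]
        · rw [Bool.or_eq_true_iff] at hb; push Not at hb
          have h1 : PySem.Chars.startswith l ['#', ' ', 'H', 'a', 's', 'h'] = false := by
            simpa using hb.1
          have h2 : PySem.Chars.startswith l ['#', ' ', 'O', 'u', 't', 'p', 'u', 't'] = false := by
            simpa using hb.2
          have hF := (ih [l]).1 (by simp [pvDropped, h1, h2])
          constructor <;> intro h <;>
            simp [pvSections, pvProcA, h3, h1, h2, h, hF]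
      · -- ordinary line: appended to the current section
        have h3' : PySem.Chars.startswith l ['#', ' '] = false := by simpa using h3
        have hsw := pvSwTrans l h3'
        have hdrop : pvDropped (cur ++ [l]) = pvDropped cur := by
          cases cur with
          | nil => simp [pvDropped, hsw.1, hsw.2]
          | cons h t => simp [pvDropped]
        constructor <;> intro h
        · have hF := (ih (cur ++ [l])).1 (by rw [hdrop]; exact h)
          simp [pvSections, pvProcA, h3', hsw.1, hsw.2, hF]
        · have hF := (ih (cur ++ [l])).2 (by rw [hdrop]; exact h)
          simp [pvSections, pvProcA, h3', hsw.1, hsw.2, hF]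

-- ===== VERDICT (by name: the statement is the Claim_ definition above) =====
theorem strip_hash_and_output_spec : Claim_equal_strip_hash_and_output := by
  intro text _
  show strip_hash_and_output text = strip_hash_and_output_alt text
  simp only [strip_hash_and_output, strip_hash_and_output_alt]
  rw [pvFoldA, (pvMain _ []).1 rfl]
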